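-- pv_equiv track=rewrite | github.com/pypi-data/pypi-mirror-402 | packages/libdev/libdev-0.101.tar.gz/libdev-0.101/libdev/check.py | fake_phone
-- ===== SOURCE A (Python) =====
-- def fake_phone(value: str) -> bool:
--     """Check a phone for a test format"""
--
--     if value is None:
--         return False
--
--     value = str(value)
--
--     return any(
--         fake in value
--         for fake in (
--             "00000",
--             "11111",
--             "22222",
--             "33333",
--             "44444",
--             "55555",
--             "66666",
--             "77777",
--             "88888",
--             "99999",
--             "12345",
--             "98765",
--             #'2345', '3456', '4567', '5678', '6789',
--             # '8765', '7654', '6543', '5432', '4321',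
--         )
--     )
-- ===== SOURCE B (Python) =====
-- def fake_phone(value: str) -> bool:
--     """Check a phone for a test format"""
--
--     if value is None:
--         return False
--
--     value = str(value)
--
--     run = 0
--     prev = ''
--     for ch in value:
--         run = run + 1 if ch == prev else 1
--         prev = ch
--         if run >= 5 and ch in "0123456789":
--             return True
--
--     return "12345" in value or "98765" in value
-- ===== Notes on version B (the rewrite author's own statement) =====
-- stated objective: alternative
-- what changed: The ten five-identical-digit substring scans are replaced by one run-length pass over the string that fires when a digit's run of equal characters reaches 5; only the two ascending/descending sequential patterns remain substring checks.
import Mathlib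
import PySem

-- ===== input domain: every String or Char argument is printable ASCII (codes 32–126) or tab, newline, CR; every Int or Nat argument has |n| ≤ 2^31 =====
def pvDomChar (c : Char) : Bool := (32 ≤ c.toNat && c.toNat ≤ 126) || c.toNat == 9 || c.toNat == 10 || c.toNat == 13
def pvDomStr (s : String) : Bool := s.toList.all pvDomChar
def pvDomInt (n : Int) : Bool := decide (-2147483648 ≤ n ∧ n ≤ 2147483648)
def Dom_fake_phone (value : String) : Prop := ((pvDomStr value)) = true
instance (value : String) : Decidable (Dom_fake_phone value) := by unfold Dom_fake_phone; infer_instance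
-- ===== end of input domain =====

-- B replaces the ten five-identical-digit substring scans by a single run-length pass over the string; objective: alternative decomposition.
-- ===== PORT A =====
def fake_phone (value : String) : Bool :=
  ["00000","11111","22222","33333","44444","55555",
   "66666","77777","88888","99999","12345","98765"].any
    (fun fake => PySem.Str.isIn fake value)

-- ===== PORT B =====
def pvDigits : List Char := "0123456789".toList

-- B's loop: run-length of consecutive equal chars; True once a digit's run reaches 5
def pvGo : Option Char → Nat → List Char → Bool
  | _, _, [] => false
  | prev, run, c :: rest =>
    let run' := if some c = prev then run + 1 else 1
    if 5 ≤ run' ∧ c ∈ pvDigits then true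
    else pvGo (some c) run' rest

def fake_phone_alt (value : String) : Bool :=
  pvGo none 0 value.toList || PySem.Str.isIn "12345" value || PySem.Str.isIn "98765" value

-- ===== PRECONDITION & SPEC =====
def Spec_fake_phone (value : String) (out : Bool) : Prop := out = fake_phone_alt value
instance (value : String) (out : Bool) : Decidable (Spec_fake_phone value out) := by unfold Spec_fake_phone; infer_instance

-- ===== CLAIM (what is proved, stated in full; the proofs are below) =====
def Claim_equal_fake_phone : Prop := ∀ (value : String), Dom_fake_phone value → Spec_fake_phone value (fake_phone value)

-- ===== LEMMAS AND PROOFS =====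

lemma pv_repl4_prefix (c : Char) (j : Nat) (h : 4 ≤ j) :
    List.replicate 4 c <+: List.replicate j c := by
  rw [List.prefix_replicate_iff]
  exact ⟨by simpa using h, by simp⟩

-- the loop invariant: pvGo succeeds iff the current run of the digit p extends to length 5,
-- or a five-long run of some digit lies wholly ahead
lemma pvGo_spec (l : List Char) (p : Char) (run : Nat) :
    pvGo (some p) run l = true ↔
      ((p ∈ pvDigits) ∧ ∃ j, 1 ≤ j ∧ 5 ≤ run + j ∧ List.replicate j p <+: l) ∨
      (∃ d ∈ pvDigits, List.replicate 5 d <:+: l) := by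
  induction l generalizing p run with
  | nil =>
    constructor
    · intro h; simp [pvGo] at h
    · rintro (⟨_, j, hj, _, hpre⟩ | ⟨d, _, hinf⟩)
      · exfalso
        have := hpre.length_le
        simp only [List.length_replicate, List.length_nil] at this
        omega
      · exfalso
        have := hinf.length_le
        simp only [List.length_replicate, List.length_nil] at this
        omega
  | cons c rest ih =>
    by_cases hcp : c = p
    · subst hcp
      by_cases hd : 5 ≤ run + 1 ∧ c ∈ pvDigits
      · have hL : pvGo (some c) run (c :: rest) = true := by
          simp [pvGo, hd.1, hd.2]
        rw [hL]
        simp only [true_iff]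
        exact Or.inl ⟨hd.2, 1, le_refl 1, by omega, by simp [List.cons_prefix_cons]⟩
      · have hstep : pvGo (some c) run (c :: rest) = pvGo (some c) (run + 1) rest := by
          have h1 : pvGo (some c) run (c :: rest)
              = if 5 ≤ run + 1 ∧ c ∈ pvDigits then true else pvGo (some c) (run + 1) rest := by
            simp [pvGo]
          rw [h1, if_neg hd]
        rw [hstep, ih c (run + 1)]
        constructor
        · rintro (⟨hD, j', hj', hr', hpre⟩ | ⟨d, hdD, hinf⟩)
          · exact Or.inl ⟨hD, j' + 1, by omega, by omega,
              by rw [List.replicate_succ]; exact List.cons_prefix_cons.mpr ⟨rfl, hpre⟩⟩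
          · exact Or.inr ⟨d, hdD, List.infix_cons hinf⟩
        · rintro (⟨hD, j, hj, hr, hpre⟩ | ⟨d, hdD, hinf⟩)
          · match j, hj, hr, hpre with
            | 1, _, hr, _ =>
              exact absurd ⟨by omega, hD⟩ hd
            | (j'' + 2), _, hr, hpre =>
              rw [List.replicate_succ, List.cons_prefix_cons] at hpre
              exact Or.inl ⟨hD, j'' + 1, by omega, by omega, hpre.2⟩
          · rcases List.infix_cons_iff.mp hinf with hpre | hinf'
            · rw [show (5:Nat) = 4 + 1 from rfl, List.replicate_succ,
                List.cons_prefix_cons] at hpre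
              obtain ⟨rfl, hpre4⟩ := hpre
              exact Or.inl ⟨hdD, 4, by omega, by omega, hpre4⟩
            · exact Or.inr ⟨d, hdD, hinf'⟩
    · have hstep : pvGo (some p) run (c :: rest) = pvGo (some c) 1 rest := by
        simp [pvGo, hcp]
      rw [hstep, ih c 1]
      constructor
      · rintro (⟨hD, j', hj', hr', hpre⟩ | ⟨d, hdD, hinf⟩)
        · have h4 : List.replicate 4 c <+: rest :=
            (pv_repl4_prefix c j' (by omega)).trans hpre
          refine Or.inr ⟨c, hD, List.IsPrefix.isInfix ?_⟩
          rw [show (5:Nat) = 4 + 1 from rfl, List.replicate_succ]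
          exact List.cons_prefix_cons.mpr ⟨rfl, h4⟩
        · exact Or.inr ⟨d, hdD, List.infix_cons hinf⟩
      · rintro (⟨hD, j, hj, hr, hpre⟩ | ⟨d, hdD, hinf⟩)
        · exfalso
          match j, hj, hpre with
          | (j'' + 1), _, hpre =>
            rw [List.replicate_succ, List.cons_prefix_cons] at hpre
            exact hcp hpre.1.symm
        · rcases List.infix_cons_iff.mp hinf with hpre | hinf'
          · rw [show (5:Nat) = 4 + 1 from rfl, List.replicate_succ,
              List.cons_prefix_cons] at hpre
            obtain ⟨rfl, hpre4⟩ := hpre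
            exact Or.inl ⟨hdD, 4, by omega, by omega, hpre4⟩
          · exact Or.inr ⟨d, hdD, hinf'⟩

lemma pvGo_none (cs : List Char) :
    (pvGo none 0 cs = true) ↔ ∃ d ∈ pvDigits, List.replicate 5 d <:+: cs := by
  cases cs with
  | nil =>
    constructor
    · intro h; simp [pvGo] at h
    · rintro ⟨d, _, hinf⟩
      exfalso
      have := hinf.length_le
      simp only [List.length_replicate, List.length_nil] at this
      omega
  | cons c rest =>
    have hstep : pvGo none 0 (c :: rest) = pvGo (some c) 1 rest := by
      simp [pvGo]
    rw [hstep, pvGo_spec rest c 1]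
    constructor
    · rintro (⟨hD, j', hj', hr', hpre⟩ | ⟨d, hdD, hinf⟩)
      · have h4 : List.replicate 4 c <+: rest :=
          (pv_repl4_prefix c j' (by omega)).trans hpre
        refine ⟨c, hD, List.IsPrefix.isInfix ?_⟩
        rw [show (5:Nat) = 4 + 1 from rfl, List.replicate_succ]
        exact List.cons_prefix_cons.mpr ⟨rfl, h4⟩
      · exact ⟨d, hdD, List.infix_cons hinf⟩
    · rintro ⟨d, hdD, hinf⟩
      rcases List.infix_cons_iff.mp hinf with hpre | hinf'
      · rw [show (5:Nat) = 4 + 1 from rfl, List.replicate_succ,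
          List.cons_prefix_cons] at hpre
        obtain ⟨rfl, hpre4⟩ := hpre
        exact Or.inl ⟨hdD, 4, by omega, by omega, hpre4⟩
      · exact Or.inr ⟨d, hdD, hinf'⟩

-- ===== VERDICT (by name: the statement is the Claim_ definition above) =====
theorem fake_phone_spec : Claim_equal_fake_phone := by
  intro value _
  unfold Spec_fake_phone fake_phone fake_phone_alt
  rw [Bool.eq_iff_iff]
  simp only [List.any_cons, List.any_nil, Bool.or_eq_true, Bool.or_false,
    PySem.Str.isIn_iff_infix, pvGo_none]
  rw [show ("00000":String).toList = List.replicate 5 '0' from by decide,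
      show ("11111":String).toList = List.replicate 5 '1' from by decide,
      show ("22222":String).toList = List.replicate 5 '2' from by decide,
      show ("33333":String).toList = List.replicate 5 '3' from by decide,
      show ("44444":String).toList = List.replicate 5 '4' from by decide,
      show ("55555":String).toList = List.replicate 5 '5' from by decide,
      show ("66666":String).toList = List.replicate 5 '6' from by decide,
      show ("77777":String).toList = List.replicate 5 '7' from by decide,
      show ("88888":String).toList = List.replicate 5 '8' from by decide,
      show ("99999":String).toList = List.replicate 5 '9' from by decide]
  constructor
  · rintro (h|h|h|h|h|h|h|h|h|h|h|h)
    · exact Or.inl (Or.inl ⟨'0', by decide, h⟩)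
    · exact Or.inl (Or.inl ⟨'1', by decide, h⟩)
    · exact Or.inl (Or.inl ⟨'2', by decide, h⟩)
    · exact Or.inl (Or.inl ⟨'3', by decide, h⟩)
    · exact Or.inl (Or.inl ⟨'4', by decide, h⟩)
    · exact Or.inl (Or.inl ⟨'5', by decide, h⟩)
    · exact Or.inl (Or.inl ⟨'6', by decide, h⟩)
    · exact Or.inl (Or.inl ⟨'7', by decide, h⟩)
    · exact Or.inl (Or.inl ⟨'8', by decide, h⟩)
    · exact Or.inl (Or.inl ⟨'9', by decide, h⟩)
    · exact Or.inl (Or.inr h)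
    · exact Or.inr h
  · rintro ((⟨d, hdD, hinf⟩|h)|h)
    · rw [show pvDigits = ['0','1','2','3','4','5','6','7','8','9'] from by decide] at hdD
      fin_cases hdD <;> tauto
    · tauto
    · tauto
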